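-- pv_equiv track=rewrite | github.com/tnakaicode/jburkardt-python | bicycle_lock/bicycle_lock.py | bicycle_lock
-- ===== SOURCE A (Python) =====
-- def bicycle_lock ( c ):
--
-- #*****************************************************************************80
-- #
-- ## BICYCLE_LOCK finds the combination on a typical bicycle lock.
-- #
-- #  Licensing:
-- #
-- #    This code is distributed under the GNU LGPL license.
-- #
-- #  Modified:
-- #
-- #    11 May 2012
-- #
-- #  Author:
-- #
-- #    John Burkardt
-- #
-- #  Parameters:
-- #
-- #    Input, integer C, the bicycle lock combination.
-- #
-- #    Output, integer STEP, the step on which the combination was found.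
-- #
--   step = 0
--
--   for a in range ( 0, 1000 ):
--
--     step = step + 1
--
--     if ( a == c ):
--       print ( '' )
--       print ( '  The combination is %d' % ( c ) )
--       return step
--
--   step = -1
--
--   return step
-- ===== SOURCE B (Python) =====
-- def bicycle_lock(c):
--     # Direct closed-form test instead of scanning 0..999.
--     if c in range(1000):
--         print('')
--         print('  The combination is %d' % (c))
--         return int(c) + 1
--     return -1
-- ===== Notes on version B (the rewrite author's own statement) =====
-- stated objective: simpler
-- what changed: Replaces the 0..999 linear scan with a direct membership test `c in range(1000)` and the closed-form step value int(c)+1.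
import Mathlib
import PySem

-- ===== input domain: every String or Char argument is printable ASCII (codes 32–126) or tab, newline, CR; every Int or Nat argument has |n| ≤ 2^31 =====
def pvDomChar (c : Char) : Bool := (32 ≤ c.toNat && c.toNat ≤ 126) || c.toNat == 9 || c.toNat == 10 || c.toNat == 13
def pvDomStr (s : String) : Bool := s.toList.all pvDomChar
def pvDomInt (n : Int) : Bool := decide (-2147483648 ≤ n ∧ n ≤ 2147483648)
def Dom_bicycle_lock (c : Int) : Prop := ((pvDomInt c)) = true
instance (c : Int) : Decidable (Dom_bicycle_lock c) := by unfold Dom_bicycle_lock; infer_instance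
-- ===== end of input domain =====

-- ===== PORT A =====
-- B replaces the 0..999 scan with a direct range test and closed-form step int(c)+1 (simpler). Printing is ignored.
def bicycleLoopA (c : Int) : List Int → Int → Int
  | [], _ => -1
  | a :: rest, step =>
    let step := step + 1
    if a == c then step else bicycleLoopA c rest step

def bicycle_lock (c : Int) : Int :=
  bicycleLoopA c (PySem.List.pyRange 0 1000 1) 0

-- ===== PORT B =====
def bicycle_lock_alt (c : Int) : Int :=
  if 0 ≤ c ∧ c < 1000 then c + 1 else -1

-- ===== PRECONDITION & SPEC =====
def Spec_bicycle_lock (c : Int) (out : Int) : Prop := out = bicycle_lock_alt c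
instance (c : Int) (out : Int) : Decidable (Spec_bicycle_lock c out) := by unfold Spec_bicycle_lock; infer_instance

-- ===== CLAIM (what is proved, stated in full; the proofs are below) =====
def Claim_equal_bicycle_lock : Prop := ∀ (c : Int), Dom_bicycle_lock c → Spec_bicycle_lock c (bicycle_lock c)

-- ===== LEMMAS AND PROOFS =====

-- ===== VERDICT (by name: the statement is the Claim_ definition above) =====
theorem bicycleLoopA_pyRange (c : Int) : ∀ (n : Nat) (a s : Int),
    bicycleLoopA c (PySem.List.pyRange a (a + n) 1) s =
      if a ≤ c ∧ c < a + n then s + (c - a) + 1 else -1 := by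
  intro n
  induction n with
  | zero =>
    intro a s
    simp [bicycleLoopA]
  | succ k ih =>
    intro a s
    have hlt : a < a + (k + 1 : Nat) := by omega
    rw [PySem.List.pyRange_one_cons hlt]
    have : a + 1 + (k : Nat) = a + ((k + 1 : Nat) : Int) := by push_cast; ring
    simp only [bicycleLoopA]
    by_cases hc : a = c
    · simp only [hc, beq_self_eq_true, if_true]
      rw [if_pos (by omega)]
      omega
    · simp only [show (a == c) = false by simpa using hc, Bool.false_eq_true, if_false]
      rw [← this, ih (a + 1) (s + 1)]
      split_ifs <;> omega

theorem bicycle_lock_spec : Claim_equal_bicycle_lock := by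
  intro c _
  unfold Spec_bicycle_lock bicycle_lock bicycle_lock_alt
  have := bicycleLoopA_pyRange c 1000 0 0
  norm_num at this
  rw [this]
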